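-- pv_equiv track=rewrite | github.com/davmanz/netback | netback-backend/core/network_util/backup.py | section_config
-- ===== SOURCE A (Python) =====
-- def section_config(config):
--     """Divide la configuración en bloques estructurados basados en títulos de secciones."""
--     sections = []
--     current_section = None
--     section_lines = []
--
--     for line in config.splitlines():
--         if line.strip():
--             if not line.startswith(" "):  # Nueva sección detectada
--                 if current_section:  # Guardar la sección anterior
--                     sections.append((current_section, section_lines))
--                 current_section = line.strip()
--                 section_lines = []
--             section_lines.append(line)
--
--     if current_section:  # Guardar la última sección
--         sections.append((current_section, section_lines))
--
--     return sections
-- ===== SOURCE B (Python) =====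
-- def section_config(config):
--     """Divide la configuración en bloques estructurados basados en títulos de secciones."""
--     lines = [l for l in config.splitlines() if l.strip()]
--     titles = [i for i, l in enumerate(lines) if not l.startswith(" ")]
--     ends = titles[1:] + [len(lines)]
--     return [(lines[s].strip(), lines[s:e]) for s, e in zip(titles, ends)]
-- ===== Notes on version B (the rewrite author's own statement) =====
-- stated objective: simpler
-- what changed: Replaces the stateful current_section/section_lines accumulator loop with a filter of blank lines, an index pass collecting title positions, and slice-based grouping between consecutive titles.
import Mathlib
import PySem

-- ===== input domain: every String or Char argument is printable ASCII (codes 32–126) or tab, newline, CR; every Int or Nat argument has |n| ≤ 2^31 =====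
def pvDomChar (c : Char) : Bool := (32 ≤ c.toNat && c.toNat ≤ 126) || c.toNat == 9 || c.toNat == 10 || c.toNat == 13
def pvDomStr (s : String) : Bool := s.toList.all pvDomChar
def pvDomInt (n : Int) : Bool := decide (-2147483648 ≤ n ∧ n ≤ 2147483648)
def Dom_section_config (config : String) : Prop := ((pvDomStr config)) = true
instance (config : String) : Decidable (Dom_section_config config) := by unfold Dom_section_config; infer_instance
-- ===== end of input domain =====

-- B replaces A's stateful current_section/section_lines accumulator with an index pass
-- collecting title positions followed by slice-based grouping (objective: simpler).

-- ===== PORT A =====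
-- the for-loop's state: (sections, current_section, section_lines)
def sectionLoop : List String → List (String × List String) → Option String → List String →
    List (String × List String) × Option String × List String
  | [], secs, cur, sl => (secs, cur, sl)
  | l :: ls, secs, cur, sl =>
    if PySem.Str.strip l ≠ "" then
      if ¬ PySem.Str.startswith l " " then
        -- 'if current_section:' — Python truthiness: None and "" are falsy
        sectionLoop ls (if cur.getD "" ≠ "" then secs ++ [(cur.getD "", sl)] else secs)
          (some (PySem.Str.strip l)) [l]
      else
        sectionLoop ls secs cur (sl ++ [l])
    else
      sectionLoop ls secs cur sl

def section_config (config : String) : List (String × List String) :=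
  let r := sectionLoop (PySem.Str.splitlines config) [] none []
  if r.2.1.getD "" ≠ "" then r.1 ++ [(r.2.1.getD "", r.2.2)] else r.1

-- ===== PORT B =====
def titlesOf (lines : List String) : List Int :=
  (PySem.List.enumerate lines 0).filterMap
    (fun p => if ¬ PySem.Str.startswith p.2 " " then some p.1 else none)

def section_config_alt (config : String) : List (String × List String) :=
  let lines := (PySem.Str.splitlines config).filter (fun l => PySem.Str.strip l ≠ "")
  let titles := titlesOf lines
  let ends := titles.tail ++ [(lines.length : Int)]
  (titles.zip ends).map
    (fun p => (PySem.Str.strip ((PySem.List.pyGet? lines p.1).getD ""),  -- lines[s]: index always in range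
               PySem.List.slice lines (some p.1) (some p.2)))

-- ===== PRECONDITION & SPEC =====
def Spec_section_config (config : String) (out : List (String × List String)) : Prop := out = section_config_alt config
instance (config : String) (out : List (String × List String)) : Decidable (Spec_section_config config out) := by unfold Spec_section_config; infer_instance

-- ===== CLAIM (what is proved, stated in full; the proofs are below) =====
def Claim_equal_section_config : Prop := ∀ (config : String), Dom_section_config config → Spec_section_config config (section_config config)

-- ===== LEMMAS AND PROOFS =====

-- common reference shape: group the blank-free line list at its unindented title lines
def grp : List String → List (String × List String)
  | [] => []
  | l :: ls =>
    if ¬ PySem.Str.startswith l " " then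
      (PySem.Str.strip l, l :: ls.takeWhile (fun x => PySem.Str.startswith x " ")) :: grp ls
    else grp ls

theorem sectionLoop_filter (ls : List String) (secs : List (String × List String))
    (cur : Option String) (sl : List String) :
    sectionLoop ls secs cur sl
      = sectionLoop (ls.filter (fun l => PySem.Str.strip l ≠ "")) secs cur sl := by
  induction ls generalizing secs cur sl with
  | nil => rfl
  | cons l ls ih =>
    by_cases hb : PySem.Str.strip l = ""
    · rw [show sectionLoop (l :: ls) secs cur sl = sectionLoop ls secs cur sl from by
        simp [sectionLoop, hb]]
      rw [ih, List.filter_cons, if_neg (by simp [hb])]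
    · rw [List.filter_cons, if_pos (by simp [hb])]
      simp only [sectionLoop]
      split_ifs <;> apply ih

def finA (r : List (String × List String) × Option String × List String) :
    List (String × List String) :=
  if r.2.1.getD "" ≠ "" then r.1 ++ [(r.2.1.getD "", r.2.2)] else r.1

theorem finA_loop_some (ls : List String) (secs : List (String × List String))
    (c : String) (sl : List String) (hnb : ∀ l ∈ ls, PySem.Str.strip l ≠ "") (hc : c ≠ "") :
    finA (sectionLoop ls secs (some c) sl)
      = secs ++ (c, sl ++ ls.takeWhile (fun x => PySem.Str.startswith x " ")) :: grp ls := by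
  induction ls generalizing secs c sl with
  | nil => simp [sectionLoop, finA, grp, hc]
  | cons l ls ih =>
    have hb : PySem.Str.strip l ≠ "" := hnb l (by simp)
    have hnb' : ∀ x ∈ ls, PySem.Str.strip x ≠ "" := fun x hx => hnb x (by simp [hx])
    by_cases ht : PySem.Chars.startswith l.toList [' '] = true
    · rw [show sectionLoop (l :: ls) secs (some c) sl = sectionLoop ls secs (some c) (sl ++ [l]) from by
        simp [sectionLoop, hb, ht]]
      rw [ih _ _ _ hnb' hc]
      simp [grp, ht]
    · rw [show sectionLoop (l :: ls) secs (some c) sl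
          = sectionLoop ls (secs ++ [(c, sl)]) (some (PySem.Str.strip l)) [l] from by
        simp [sectionLoop, hb, ht, hc]]
      rw [ih _ _ _ hnb' hb]
      simp [grp, ht]

theorem finA_loop_none (ls : List String) (secs : List (String × List String))
    (sl : List String) (hnb : ∀ l ∈ ls, PySem.Str.strip l ≠ "") :
    finA (sectionLoop ls secs none sl) = secs ++ grp ls := by
  induction ls generalizing secs sl with
  | nil => simp [sectionLoop, finA, grp]
  | cons l ls ih =>
    have hb : PySem.Str.strip l ≠ "" := hnb l (by simp)
    have hnb' : ∀ x ∈ ls, PySem.Str.strip x ≠ "" := fun x hx => hnb x (by simp [hx])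
    by_cases ht : PySem.Chars.startswith l.toList [' '] = true
    · rw [show sectionLoop (l :: ls) secs none sl = sectionLoop ls secs none (sl ++ [l]) from by
        simp [sectionLoop, hb, ht]]
      rw [ih _ _ hnb']
      simp [grp, ht]
    · rw [show sectionLoop (l :: ls) secs none sl
          = sectionLoop ls secs (some (PySem.Str.strip l)) [l] from by
        simp [sectionLoop, hb, ht]]
      rw [finA_loop_some ls _ _ _ hnb' hb]
      simp [grp, ht]

theorem A_eq_grp (config : String) :
    section_config config
      = grp ((PySem.Str.splitlines config).filter (fun l => PySem.Str.strip l ≠ "")) := by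
  have h := finA_loop_none ((PySem.Str.splitlines config).filter (fun l => PySem.Str.strip l ≠ ""))
    [] [] (by intro l hl; exact (List.mem_filter.mp hl).2 |> of_decide_eq_true)
  simpa [section_config, finA, sectionLoop_filter] using h

-- B-side: the slice/zip construction satisfies grp's recursion
theorem enumerate_shift {α : Type} (xs : List α) (s : Int) :
    PySem.List.enumerate xs (s + 1) = (PySem.List.enumerate xs s).map (fun p => (p.1 + 1, p.2)) := by
  induction xs generalizing s with
  | nil => simp [PySem.List.enumerate_nil]
  | cons x xs ih => simp [PySem.List.enumerate_cons, ih]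

theorem titlesOf_cons (l : String) (ls : List String) :
    titlesOf (l :: ls)
      = (if ¬ PySem.Str.startswith l " " then [(0 : Int)] else []) ++ (titlesOf ls).map (· + 1) := by
  unfold titlesOf
  rw [PySem.List.enumerate_cons, enumerate_shift, List.filterMap_cons, List.filterMap_map,
    List.map_filterMap]
  have hfun : ((fun p : Int × String => if ¬ PySem.Str.startswith p.2 " " then some p.1 else none)
        ∘ (fun p : Int × String => (p.1 + 1, p.2)))
      = fun p : Int × String =>
          Option.map (· + 1) (if ¬ PySem.Str.startswith p.2 " " then some p.1 else none) := by
    funext p; by_cases h : ¬ PySem.Str.startswith p.2 " " = true <;> simp [h]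
  rw [hfun]
  by_cases h : PySem.Chars.startswith l.toList [' '] = true <;> simp [h]

theorem titles_mem (ls : List String) (i : Int) (hi : i ∈ titlesOf ls) :
    ∃ k : Nat, i = (k : Int) := by
  simp only [titlesOf, List.mem_filterMap] at hi
  obtain ⟨p, hp, hif⟩ := hi
  rw [PySem.List.mem_enumerate_iff] at hp
  obtain ⟨k, hk, rfl⟩ := hp
  split_ifs at hif
  simp only [Option.some.injEq] at hif
  exact ⟨k, by omega⟩

theorem titles_head (ls : List String) :
    (titlesOf ls = [] → ls.takeWhile (fun x => PySem.Str.startswith x " ") = ls) ∧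
    (∀ t rest, titlesOf ls = t :: rest →
      t = ((ls.takeWhile (fun x => PySem.Str.startswith x " ")).length : Int)) := by
  induction ls with
  | nil =>
    refine ⟨fun _ => rfl, fun t rest h => ?_⟩
    simp [titlesOf, PySem.List.enumerate_nil] at h
  | cons l ls ih =>
    by_cases ht : PySem.Str.startswith l " "
    · refine ⟨?_, ?_⟩
      · intro h
        rw [titlesOf_cons, if_neg (not_not_intro ht), List.nil_append] at h
        rw [List.takeWhile_cons, if_pos ht, ih.1 (List.map_eq_nil_iff.mp h)]
      · intro t rest h
        rw [titlesOf_cons, if_neg (not_not_intro ht), List.nil_append] at h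
        rcases hts : titlesOf ls with _ | ⟨t₀, rest₀⟩
        · rw [hts] at h; simp at h
        · rw [hts, List.map_cons] at h
          have h1 : t = t₀ + 1 := (List.cons.injEq _ _ _ _ ▸ h).1.symm
          have h2 := ih.2 t₀ rest₀ hts
          rw [List.takeWhile_cons, if_pos ht]
          rw [h1, h2]
          push_cast [List.length_cons]
          ring
    · refine ⟨?_, ?_⟩
      · intro h
        rw [titlesOf_cons, if_pos ht] at h
        simp at h
      · intro t rest h
        rw [titlesOf_cons, if_pos ht, List.singleton_append] at h
        have h1 : t = 0 := ((List.cons.injEq _ _ _ _ ▸ h).1).symm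
        rw [List.takeWhile_cons, if_neg ht, h1]
        simp

def bPair (lines : List String) (p : Int × Int) : String × List String :=
  (PySem.Str.strip ((PySem.List.pyGet? lines p.1).getD ""),
   PySem.List.slice lines (some p.1) (some p.2))

def bcore (lines : List String) : List (String × List String) :=
  ((titlesOf lines).zip ((titlesOf lines).tail ++ [(lines.length : Int)])).map (bPair lines)

theorem mem_zip_parts {α β : Type} (p : α × β) (l1 : List α) (l2 : List β)
    (h : p ∈ l1.zip l2) : p.1 ∈ l1 ∧ p.2 ∈ l2 := by
  induction l1 generalizing l2 with
  | nil => simp [List.zip] at h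
  | cons a as ih =>
    cases l2 with
    | nil => simp [List.zip] at h
    | cons b bs =>
      rw [List.zip_cons_cons, List.mem_cons] at h
      rcases h with rfl | h
      · simp
      · have := ih bs h; simp [this.1, this.2]

theorem bPair_shift (l : String) (ls : List String) (k m : Nat) :
    bPair (l :: ls) ((k : Int) + 1, (m : Int) + 1) = bPair ls ((k : Int), (m : Int)) := by
  have h1 : ((k : Int) + 1) = ((k + 1 : Nat) : Int) := by push_cast; ring
  have h2 : ((m : Int) + 1) = ((m + 1 : Nat) : Int) := by push_cast; ring
  simp only [bPair, h1, h2, PySem.List.pyGet?_natCast, PySem.List.slice_natCast]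
  simp [List.getElem?_cons_succ, List.drop_succ_cons, Nat.succ_sub_succ]

theorem map_shift_pairs (l : String) (ls : List String) :
    (((titlesOf ls).map (· + 1)).zip
        (((titlesOf ls).map (· + 1)).tail ++ [((l :: ls).length : Int)])).map (bPair (l :: ls))
      = bcore ls := by
  have hlen : ((l :: ls).length : Int) = (ls.length : Int) + 1 := by
    push_cast [List.length_cons]; ring
  have htail : ((titlesOf ls).map (· + 1)).tail = (titlesOf ls).tail.map (· + 1) := by
    cases titlesOf ls <;> simp
  rw [hlen, htail]
  have hcat : (titlesOf ls).tail.map (· + 1) ++ [(ls.length : Int) + 1]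
      = ((titlesOf ls).tail ++ [(ls.length : Int)]).map (· + 1) := by simp
  rw [hcat, List.zip_map, List.map_map, bcore]
  apply List.map_congr_left
  intro p hp
  have hmem := mem_zip_parts p _ _ hp
  obtain ⟨k, hk⟩ := titles_mem ls p.1 hmem.1
  have h2 : ∃ m : Nat, p.2 = (m : Int) := by
    rcases List.mem_append.mp hmem.2 with h | h
    · exact titles_mem ls p.2 (List.mem_of_mem_tail h)
    · simp at h; exact ⟨ls.length, h⟩
  obtain ⟨m, hm⟩ := h2
  have hpeq : p = ((k : Int), (m : Int)) := by
    rcases p with ⟨a, b⟩; simp_all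
  rw [hpeq]
  exact bPair_shift l ls k m

theorem bcore_eq_grp (lines : List String) : bcore lines = grp lines := by
  induction lines with
  | nil => simp [bcore, titlesOf, grp, PySem.List.enumerate_nil]
  | cons l ls ih =>
    by_cases ht : PySem.Str.startswith l " "
    · -- indented head: no new title, everything shifts
      rw [grp, if_neg (not_not_intro ht), ← ih]
      rw [bcore, titlesOf_cons, if_neg (not_not_intro ht), List.nil_append]
      exact map_shift_pairs l ls
    · -- title head
      rw [grp, if_pos ht, ← ih]
      rw [bcore, titlesOf_cons, if_pos ht, List.singleton_append]
      rcases hts : titlesOf ls with _ | ⟨t, rest⟩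
      · -- no further titles: single section = the whole remaining list
        have hall := (titles_head ls).1 hts
        simp only [List.map_nil, List.nil_append, List.tail_cons, List.zip_cons_cons,
          List.zip_nil_left, List.map_cons, List.map_nil, bcore, hts]
        rw [show ((0 : Int)) = ((0 : Nat) : Int) from rfl]
        simp only [bPair, PySem.List.pyGet?_natCast, PySem.List.slice_natCast]
        simp only [List.getElem?_cons_zero, Option.getD_some, List.drop_zero, Nat.sub_zero,
          List.take_length, hall]
      · -- a further title at t: head section is lines[0:t+1], the rest shifts
        have htv := (titles_head ls).2 t rest hts
        simp only [List.map_cons, List.tail_cons, List.cons_append, List.zip_cons_cons]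
        have hms := map_shift_pairs l ls
        rw [hts] at hms
        simp only [List.map_cons, List.tail_cons] at hms
        rw [hms]
        congr 1
        have ht1 : t + 1 = (((ls.takeWhile (fun x => PySem.Str.startswith x " ")).length
            + 1 : Nat) : Int) := by rw [htv]; push_cast; ring
        rw [show ((0 : Int)) = ((0 : Nat) : Int) from rfl, ht1]
        simp only [bPair, PySem.List.pyGet?_natCast, PySem.List.slice_natCast]
        simp only [List.getElem?_cons_zero, Option.getD_some, List.drop_zero, Nat.sub_zero,
          List.take_succ_cons]
        rw [← List.prefix_iff_eq_take.mp (List.takeWhile_prefix _)]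

-- ===== VERDICT (by name: the statement is the Claim_ definition above) =====
theorem section_config_spec : Claim_equal_section_config := by
  intro config _
  show section_config config = section_config_alt config
  rw [A_eq_grp]
  show _ = bcore _
  rw [bcore_eq_grp]
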